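-- pv_equiv track=rewrite | github.com/ironbar/google_code_jam_python | practice/online_judge/514_rails.py | find_split_groups
-- ===== SOURCE A (Python) =====
-- def find_split_groups(train_conf):
--     groups = []
--     current_group = []
--     for coach, next_coach in zip(train_conf[:-1], train_conf[1:]):
--         current_group.append(coach)
--         if coach < next_coach:
--             groups.append(current_group)
--             current_group = []
--     if current_group:
--         if train_conf[-1] > current_group[-1]:
--             groups.append(current_group)
--             groups.append([train_conf[-1]])
--         else:
--             groups.append(current_group + [train_conf[-1]])
--     else:
--         groups.append([train_conf[-1]])
--     return groups
-- ===== SOURCE B (Python) =====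
-- def find_split_groups(train_conf):
--     last = train_conf[-1]
--     rev_groups = [[last]]  # groups in reverse order, each group reversed
--     prev = last
--     for x in reversed(train_conf[:-1]):
--         if x < prev:
--             rev_groups.append([x])
--         else:
--             rev_groups[-1].append(x)
--         prev = x
--     return [list(reversed(g)) for g in reversed(rev_groups)]
-- ===== Notes on version B (the rewrite author's own statement) =====
-- stated objective: alternative
-- what changed: B builds the groups in a single right-to-left pass over the list (appending in reversed order and reversing once at the end), prepend-style, instead of A's forward accumulate-and-flush loop over zipped adjacent pairs with its separate final-element branch.
import Mathlib
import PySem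

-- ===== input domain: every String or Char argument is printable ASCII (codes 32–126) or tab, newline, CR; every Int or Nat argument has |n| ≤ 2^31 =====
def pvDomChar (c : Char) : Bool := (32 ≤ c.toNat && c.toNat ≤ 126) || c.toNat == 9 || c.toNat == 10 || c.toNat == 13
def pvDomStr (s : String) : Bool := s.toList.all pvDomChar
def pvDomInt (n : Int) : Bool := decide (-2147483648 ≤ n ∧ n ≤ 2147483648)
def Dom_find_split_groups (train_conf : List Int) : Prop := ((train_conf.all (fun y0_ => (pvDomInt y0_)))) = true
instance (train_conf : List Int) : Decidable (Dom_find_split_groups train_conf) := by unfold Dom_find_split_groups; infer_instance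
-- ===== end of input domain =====

-- B replaces A's forward accumulate-and-flush loop (zip of adjacent pairs + a special
-- final-element block) with a single right-to-left pass that extends or opens the current
-- group (built reversed, reversed once at the end); objective: alternative decomposition.


-- ===== PORT A =====
-- loop body of A: current_group.append(coach); flush on ascent
def pvStepA (st : List (List Int) × List Int) (p : Int × Int) : List (List Int) × List Int :=
  let cg := st.2 ++ [p.1]
  if p.1 < p.2 then (st.1 ++ [cg], ([] : List Int)) else (st.1, cg)

-- A's final block after the loop (last = train_conf[-1]); pyGetD is exact: used only when st.2 ≠ []
def pvFinishA (last : Int) (st : List (List Int) × List Int) : List (List Int) :=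
  if st.2 ≠ [] then
    if PySem.List.pyGetD st.2 (-1) 0 < last then  -- train_conf[-1] > current_group[-1]
      st.1 ++ [st.2] ++ [[last]]
    else
      st.1 ++ [st.2 ++ [last]]
  else
    st.1 ++ [[last]]

def find_split_groups (train_conf : List Int) : List (List Int) :=
  let st := (List.zip (PySem.List.slice train_conf none (some (-1)))
                      (PySem.List.slice train_conf (some 1) none)).foldl pvStepA ([], [])
  match PySem.List.pyGet? train_conf (-1) with
  | none => []   -- train_conf[-1] raises IndexError on empty input; excluded by Pre_
  | some last => pvFinishA last st

-- ===== PORT B =====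
-- loop body of B: state = (rev_groups, prev); rev_groups is never empty, so the none
-- branch of rev_groups[-1] is unreachable
def pvStepB (st : List (List Int) × Int) (x : Int) : List (List Int) × Int :=
  if x < st.2 then (st.1 ++ [[x]], x)
  else
    match st.1.getLast? with
    | none => ([[x]], x)                            -- unreachable (rev_groups never empty)
    | some g => (st.1.dropLast ++ [g ++ [x]], x)

def find_split_groups_alt (train_conf : List Int) : List (List Int) :=
  match PySem.List.pyGet? train_conf (-1) with
  | none => []   -- train_conf[-1] raises IndexError on empty input; excluded by Pre_
  | some last =>
    let st := (PySem.List.slice train_conf none (some (-1))).reverse.foldl pvStepB ([[last]], last)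
    st.1.reverse.map (fun g => g.reverse)

-- ===== PRECONDITION & SPEC =====
-- Pre_ excludes only the empty list, on which A raises IndexError (train_conf[-1]).
def Pre_find_split_groups (train_conf : List Int) : Prop := train_conf ≠ []
instance (train_conf : List Int) : Decidable (Pre_find_split_groups train_conf) := by
  unfold Pre_find_split_groups; infer_instance

def pvWitness_find_split_groups : List Int := [1]

def Spec_find_split_groups (train_conf : List Int) (out : List (List Int)) : Prop := out = find_split_groups_alt train_conf
instance (train_conf : List Int) (out : List (List Int)) : Decidable (Spec_find_split_groups train_conf out) := by unfold Spec_find_split_groups; infer_instance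

-- ===== CLAIM (what is proved, stated in full; the proofs are below) =====
def Claim_equal_find_split_groups : Prop := ∀ (train_conf : List Int), Dom_find_split_groups train_conf → Pre_find_split_groups train_conf → Spec_find_split_groups train_conf (find_split_groups train_conf)

-- ===== LEMMAS AND PROOFS =====

-- prepend a (possibly empty) partial group onto the first group of a split
def pvAttach (cg : List Int) : List (List Int) → List (List Int)
  | [] => [cg]
  | g :: gs => (cg ++ g) :: gs

-- the canonical split: cut after every element that is smaller than its successor
def pvCsplit (x : Int) : List Int → List (List Int)
  | [] => [[x]]
  | y :: r => if x < y then [x] :: pvCsplit y r else pvAttach [x] (pvCsplit y r)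

theorem pvAttach_ne_nil (cg : List Int) (l : List (List Int)) : pvAttach cg l ≠ [] := by
  cases l <;> simp [pvAttach]

theorem pvCsplit_ne_nil (x : Int) (r : List Int) : pvCsplit x r ≠ [] := by
  cases r with
  | nil => simp [pvCsplit]
  | cons y r' =>
    simp only [pvCsplit]
    split
    · simp
    · exact pvAttach_ne_nil _ _

theorem pvAttach_nil (l : List (List Int)) (h : l ≠ []) : pvAttach [] l = l := by
  cases l with
  | nil => exact absurd rfl h
  | cons g gs => simp [pvAttach]

theorem pvAttach_attach (cg : List Int) (x : Int) (l : List (List Int)) :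
    pvAttach cg (pvAttach [x] l) = pvAttach (cg ++ [x]) l := by
  cases l <;> simp [pvAttach]

-- ===== A-side =====

theorem pvLemA : ∀ (r : List Int) (x last : Int) (gs : List (List Int)) (cg : List Int),
    (x :: r).getLast? = some last →
    (∀ c, cg.getLast? = some c → ¬ c < x) →
    pvFinishA last (List.foldl pvStepA (gs, cg) (List.zip (x :: r).dropLast (x :: r).tail))
      = gs ++ pvAttach cg (pvCsplit x r) := by
  intro r
  induction r with
  | nil =>
    intro x last gs cg hlast hcg
    obtain rfl : x = last := by simpa using hlast
    simp only [List.zip_nil_right, List.tail_cons, List.foldl_nil]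
    cases cg with
    | nil => simp [pvFinishA, pvCsplit, pvAttach]
    | cons c0 cg' =>
      have hne : c0 :: cg' ≠ [] := by simp
      have hlt : ¬ (c0 :: cg').getLast hne < x :=
        hcg _ (List.getLast?_eq_some_getLast hne)
      have hle := not_lt.mp hlt
      simp [pvFinishA, PySem.List.pyGetD_neg_one _ 0 hne, hlt, pvCsplit, pvAttach]
  | cons y r' ih =>
    intro x last gs cg hlast hcg
    have hzip : List.zip (x :: y :: r').dropLast (x :: y :: r').tail
        = (x, y) :: List.zip (y :: r').dropLast (y :: r').tail := by
      cases r' <;> simp [List.zip]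
    have hlast' : (y :: r').getLast? = some last := by
      rwa [List.getLast?_cons_cons] at hlast
    rw [hzip, List.foldl_cons]
    by_cases hxy : x < y
    · have hstep : pvStepA (gs, cg) (x, y) = (gs ++ [cg ++ [x]], ([] : List Int)) := by
        simp [pvStepA, hxy]
      rw [hstep, ih y last (gs ++ [cg ++ [x]]) [] hlast' (by simp)]
      rw [pvAttach_nil _ (pvCsplit_ne_nil y r')]
      simp [pvCsplit, hxy, pvAttach]
    · have hstep : pvStepA (gs, cg) (x, y) = (gs, cg ++ [x]) := by
        simp [pvStepA, hxy]
      rw [hstep, ih y last gs (cg ++ [x]) hlast'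
        (by intro c hc; rw [List.getLast?_concat] at hc; injection hc with h; omega)]
      simp [pvCsplit, hxy, pvAttach_attach]

theorem pvA_eq_csplit (x : Int) (r : List Int) :
    find_split_groups (x :: r) = pvCsplit x r := by
  unfold find_split_groups
  rw [PySem.List.pyGet?_neg_one, PySem.List.slice_to_neg_one, PySem.List.slice_from_one]
  obtain ⟨c, hc⟩ : ∃ c, (x :: r).getLast? = some c :=
    ⟨_, List.getLast?_eq_some_getLast (by simp)⟩
  rw [hc]
  simp only []
  rw [pvLemA r x c [] [] hc (by simp)]
  rw [pvAttach_nil _ (pvCsplit_ne_nil x r)]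
  simp

-- ===== B-side =====

-- the state of B's backward loop after processing l (to the left of the final coach `last`)
def pvSplitR (l : List Int) (last : Int) : List (List Int) :=
  match l with
  | [] => [[last]]
  | x :: l' => if x < l'.headD last then [x] :: pvSplitR l' last else pvAttach [x] (pvSplitR l' last)

theorem pvSplitR_ne_nil (l : List Int) (last : Int) : pvSplitR l last ≠ [] := by
  cases l with
  | nil => simp [pvSplitR]
  | cons x l' =>
    simp only [pvSplitR]
    split
    · simp
    · exact pvAttach_ne_nil _ _

theorem pvLemB1 : ∀ (l : List Int) (last : Int),
    List.foldr (fun x st => pvStepB st x) ([[last]], last) l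
      = (((pvSplitR l last).map List.reverse).reverse, l.headD last) := by
  intro l
  induction l with
  | nil => intro last; simp [pvSplitR]
  | cons x l' ih =>
    intro last
    rw [List.foldr_cons, ih last]
    show pvStepB (((pvSplitR l' last).map List.reverse).reverse, l'.headD last) x
      = (((pvSplitR (x :: l') last).map List.reverse).reverse, x)
    by_cases h : x < l'.headD last
    · have h' : x < l'.head?.getD last := by rwa [List.headD_eq_head?] at h
      have hsr : pvSplitR (x :: l') last = [x] :: pvSplitR l' last := by
        show (if x < l'.headD last then _ else _) = _
        rw [if_pos h]
      simp [pvStepB, h', hsr]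
    · have h' : ¬ x < l'.head?.getD last := by rwa [List.headD_eq_head?] at h
      have hsr : pvSplitR (x :: l') last = pvAttach [x] (pvSplitR l' last) := by
        show (if x < l'.headD last then _ else _) = _
        rw [if_neg h]
      cases hs : pvSplitR l' last with
      | nil => exact absurd hs (pvSplitR_ne_nil l' last)
      | cons g gs =>
        simp [pvStepB, h', hsr, hs, pvAttach, List.getLast?_reverse]

theorem pvLemB2 : ∀ (l : List Int) (x last : Int),
    pvSplitR (x :: l) last = pvCsplit x (l ++ [last]) := by
  intro l
  induction l with
  | nil =>
    intro x last
    simp [pvSplitR, pvCsplit]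
  | cons y l' ih =>
    intro x last
    show (if x < (y :: l').headD last then [x] :: pvSplitR (y :: l') last
          else pvAttach [x] (pvSplitR (y :: l') last))
        = pvCsplit x ((y :: l') ++ [last])
    rw [ih y last]
    simp only [List.headD_cons, List.cons_append]
    rfl

theorem pvB_eq_csplit (x : Int) (r : List Int) :
    find_split_groups_alt (x :: r) = pvCsplit x r := by
  unfold find_split_groups_alt
  rw [PySem.List.pyGet?_neg_one, PySem.List.slice_to_neg_one]
  obtain ⟨c, hc⟩ : ∃ c, (x :: r).getLast? = some c :=
    ⟨_, List.getLast?_eq_some_getLast (by simp)⟩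
  rw [hc]
  simp only []
  rw [List.foldl_reverse, pvLemB1]
  simp only [List.reverse_reverse, List.map_map]
  rcases List.eq_nil_or_concat r with hr | ⟨l', last, hr⟩
  · subst hr
    obtain rfl : x = c := by simpa using hc
    simp [pvSplitR, pvCsplit]
  · rw [List.concat_eq_append] at hr
    subst hr
    have hlastc : (x :: (l' ++ [last])).getLast? = some last := by
      rw [show x :: (l' ++ [last]) = (x :: l') ++ [last] by simp]
      exact List.getLast?_concat
    obtain rfl : last = c := by rw [hlastc] at hc; injection hc
    have h1 : (x :: (l' ++ [last])).dropLast = x :: l' := by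
      rw [show x :: (l' ++ [last]) = (x :: l') ++ [last] by simp]
      exact List.dropLast_concat
    rw [h1, pvLemB2 l' x last]
    simp

-- ===== VERDICT (by name: the statement is the Claim_ definition above) =====
theorem find_split_groups_spec : Claim_equal_find_split_groups := by
  intro t _ hpre
  unfold Spec_find_split_groups
  cases t with
  | nil => exact absurd rfl hpre
  | cons x r => rw [pvA_eq_csplit, pvB_eq_csplit]
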